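-- pv_equiv track=rewrite | github.com/Tiwariji-07/Marketplace-Agent | agents/tools/git_analyzer.py | _extract_features_from_readme
-- ===== SOURCE A (Python) =====
-- from typing import Dict, List, Optional, Any, Tuple, Union
--
-- def _extract_features_from_readme(readme_content: str) -> Tuple[str, str]:
--     """Extract features and use cases from README content."""
--     features = []
--     usecases = []
--
--     # Simple pattern matching for features and use cases
--     lines = readme_content.split('\n')
--     in_features_section = False
--     in_usecase_section = False
--
--     for line in lines:
--         line_lower = line.lower()
--
--         # Detect sections
--         if "feature" in line_lower and ("##" in line or "# " in line):
--             in_features_section = True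
--             in_usecase_section = False
--             continue
--         elif "usecase" in line_lower or "use case" in line_lower or "examples" in line_lower:
--             in_features_section = False
--             in_usecase_section = True
--             continue
--
--         # Extract bullet points or numbered lists
--         if (line.strip().startswith('- ') or line.strip().startswith('* ') or
--             (line.strip() and line.strip()[0].isdigit() and '. ' in line[:5])):
--             if in_features_section:
--                 features.append(line.strip(' -*').strip())
--             elif in_usecase_section:
--                 usecases.append(line.strip(' -*').strip())
--
--     return ", ".join(features[:5]), ", ".join(usecases[:3])
-- ===== SOURCE B (Python) =====
-- def _extract_features_from_readme(readme_content):
--     """Backward scan: bullets are buffered, then attributed to the nearest header above."""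
--     def tag(line):
--         ll = line.lower()
--         if "feature" in ll and ("##" in line or "# " in line):
--             return "features"
--         if "usecase" in ll or "use case" in ll or "examples" in ll:
--             return "usecases"
--         return None
--
--     features, usecases, pending = [], [], []
--     for line in reversed(readme_content.split('\n')):
--         t = tag(line)
--         if t == "features":
--             features = pending + features
--             pending = []
--         elif t == "usecases":
--             usecases = pending + usecases
--             pending = []
--         else:
--             s = line.strip()
--             if s.startswith('- ') or s.startswith('* ') or (s and s[0].isdigit() and '. ' in line[:5]):
--                 pending = [line.strip(' -*').strip()] + pending
--     return ", ".join(features[:5]), ", ".join(usecases[:3])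
-- ===== Notes on version B (the rewrite author's own statement) =====
-- stated objective: alternative
-- what changed: Replaced the forward section-flag state machine with a right-to-left scan: bullets are collected into a pending buffer and, when a header is reached, the buffer is attributed wholesale to that header's list (building the output back-to-front); the proof shows the traversal direction does not matter.
import Mathlib
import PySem

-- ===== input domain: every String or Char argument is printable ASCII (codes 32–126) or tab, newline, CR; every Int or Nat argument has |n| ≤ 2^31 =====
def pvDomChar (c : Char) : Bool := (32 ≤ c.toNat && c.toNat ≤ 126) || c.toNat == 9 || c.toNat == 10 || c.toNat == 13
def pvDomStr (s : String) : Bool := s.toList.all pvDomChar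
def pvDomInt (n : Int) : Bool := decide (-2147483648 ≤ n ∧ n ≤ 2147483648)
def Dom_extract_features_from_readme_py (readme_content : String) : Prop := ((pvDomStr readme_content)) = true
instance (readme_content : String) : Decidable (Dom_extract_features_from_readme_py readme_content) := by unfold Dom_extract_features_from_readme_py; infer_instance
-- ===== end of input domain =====

-- B replaces A's forward section-flag state machine by a right-to-left scan with a pending
-- bullet buffer attributed to the nearest header above; same cost, different traversal order.

-- ===== PORT A =====
-- literal transliteration of A's single forward loop with section flags
def extract_features_from_readme_py (readme_content : String) : String × String :=
  let lines := (PySem.Str.split? readme_content "\n").getD []   -- sep "\n" ≠ "", so split? is some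
  let st := lines.foldl
    (fun (st : List String × List String × Bool × Bool) line =>
      let features := st.1
      let usecases := st.2.1
      let inF := st.2.2.1
      let inU := st.2.2.2
      let ll := PySem.Str.lower line
      if PySem.Str.isIn "feature" ll && (PySem.Str.isIn "##" line || PySem.Str.isIn "# " line) then
        (features, usecases, true, false)
      else if PySem.Str.isIn "usecase" ll || PySem.Str.isIn "use case" ll || PySem.Str.isIn "examples" ll then
        (features, usecases, false, true)
      else
        if PySem.Str.startswith (PySem.Str.strip line) "- " ||
           PySem.Str.startswith (PySem.Str.strip line) "* " ||
           (!(PySem.Str.strip line == "") &&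
             (match (PySem.Str.strip line).toList with
              | [] => false
              | ch :: _ => PySem.Chars.isdigit ch) &&
             PySem.Str.isIn ". " (PySem.Str.slice line none (some 5))) then
          if inF then
            (features ++ [PySem.Str.strip (PySem.Str.stripChars line " -*")], usecases, inF, inU)
          else if inU then
            (features, usecases ++ [PySem.Str.strip (PySem.Str.stripChars line " -*")], inF, inU)
          else (features, usecases, inF, inU)
        else (features, usecases, inF, inU))
    ([], [], false, false)
  (PySem.Str.join ", " (PySem.List.slice st.1 none (some 5)),
   PySem.Str.join ", " (PySem.List.slice st.2.1 none (some 3)))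

-- ===== PORT B =====
def pvTagOf (line : String) : Option String :=
  let ll := PySem.Str.lower line
  if PySem.Str.isIn "feature" ll && (PySem.Str.isIn "##" line || PySem.Str.isIn "# " line) then
    some "features"
  else if PySem.Str.isIn "usecase" ll || PySem.Str.isIn "use case" ll || PySem.Str.isIn "examples" ll then
    some "usecases"
  else
    none

def pvIsBullet (line : String) : Bool :=
  let t := PySem.Str.strip line
  PySem.Str.startswith t "- " || PySem.Str.startswith t "* " ||
  (!(t == "") &&
    (match t.toList with
     | [] => false
     | ch :: _ => PySem.Chars.isdigit ch) &&
    PySem.Str.isIn ". " (PySem.Str.slice line none (some 5)))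

def pvClean (line : String) : String := PySem.Str.strip (PySem.Str.stripChars line " -*")

-- the body of B's reversed loop: state = (features, usecases, pending)
def pvStepBwd (st : List String × List String × List String) (line : String) :
    List String × List String × List String :=
  let t := pvTagOf line
  if t == some "features" then (st.2.2 ++ st.1, st.2.1, [])
  else if t == some "usecases" then (st.1, st.2.2 ++ st.2.1, [])
  else if pvIsBullet line then (st.1, st.2.1, [pvClean line] ++ st.2.2)
  else st

def extract_features_from_readme_py_alt (readme_content : String) : String × String :=
  let lines := (PySem.Str.split? readme_content "\n").getD []
  let st := lines.reverse.foldl pvStepBwd ([], [], [])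
  (PySem.Str.join ", " (PySem.List.slice st.1 none (some 5)),
   PySem.Str.join ", " (PySem.List.slice st.2.1 none (some 3)))

-- ===== PRECONDITION & SPEC =====
def Spec_extract_features_from_readme_py (readme_content : String) (out : String × String) : Prop := out = extract_features_from_readme_py_alt readme_content
instance (readme_content : String) (out : String × String) : Decidable (Spec_extract_features_from_readme_py readme_content out) := by unfold Spec_extract_features_from_readme_py; infer_instance

-- ===== CLAIM (what is proved, stated in full; the proofs are below) =====
def Claim_equal_extract_features_from_readme_py : Prop := ∀ (readme_content : String), Dom_extract_features_from_readme_py readme_content → Spec_extract_features_from_readme_py readme_content (extract_features_from_readme_py readme_content)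

-- ===== LEMMAS AND PROOFS =====
def pvCondF (line : String) : Bool :=
  PySem.Str.isIn "feature" (PySem.Str.lower line) &&
    (PySem.Str.isIn "##" line || PySem.Str.isIn "# " line)

def pvCondU (line : String) : Bool :=
  PySem.Str.isIn "usecase" (PySem.Str.lower line) ||
    PySem.Str.isIn "use case" (PySem.Str.lower line) ||
    PySem.Str.isIn "examples" (PySem.Str.lower line)

def pvStepA (st : List String × List String × Bool × Bool) (line : String) :
    List String × List String × Bool × Bool :=
  if pvCondF line then (st.1, st.2.1, true, false)
  else if pvCondU line then (st.1, st.2.1, false, true)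
  else if pvIsBullet line then
    if st.2.2.1 then (st.1 ++ [pvClean line], st.2.1, st.2.2.1, st.2.2.2)
    else if st.2.2.2 then (st.1, st.2.1 ++ [pvClean line], st.2.2.1, st.2.2.2)
    else st
  else st

def pvTag (inF inU : Bool) : Option String :=
  if inF then some "features" else if inU then some "usecases" else none

-- attribute the pending buffer of a backward-scan state according to a section tag
def pvAssign (t : Option String) (s : List String × List String × List String) :
    List String × List String :=
  if t == some "features" then (s.2.2 ++ s.1, s.2.1)
  else if t == some "usecases" then (s.1, s.2.2 ++ s.2.1)
  else (s.1, s.2.1)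

-- B's reversed loop as a foldr (right-to-left processing of the original list)
def pvR (lines : List String) : List String × List String × List String :=
  lines.foldr (fun l s => pvStepBwd s l) ([], [], [])

theorem pvTagOf_eq (line : String) :
    pvTagOf line =
      if pvCondF line then some "features"
      else if pvCondU line then some "usecases" else none := rfl

theorem pvMain (lines : List String) :
    ∀ (fs us : List String) (inF inU : Bool),
      (lines.foldl pvStepA (fs, us, inF, inU)).1 =
          fs ++ (pvAssign (pvTag inF inU) (pvR lines)).1 ∧
      (lines.foldl pvStepA (fs, us, inF, inU)).2.1 =
          us ++ (pvAssign (pvTag inF inU) (pvR lines)).2 := by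
  induction lines with
  | nil =>
    intro fs us inF inU
    cases inF <;> cases inU <;> simp [List.foldl, pvR, pvAssign, pvTag]
  | cons line rest ih =>
    intro fs us inF inU
    have hR : pvR (line :: rest) = pvStepBwd (pvR rest) line := rfl
    rw [List.foldl_cons, hR]
    by_cases hF : pvCondF line
    · obtain ⟨h1, h2⟩ := ih fs us true false
      simp only [pvStepA, pvStepBwd, pvTagOf_eq, hF]
      simp only [if_true, Option.some.injEq, beq_iff_eq, reduceCtorEq, if_pos, reduceIte,
        String.reduceEq]
      constructor
      · rw [h1]; cases inF <;> cases inU <;> simp [pvAssign, pvTag]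
      · rw [h2]; cases inF <;> cases inU <;> simp [pvAssign, pvTag]
    · by_cases hU : pvCondU line
      · obtain ⟨h1, h2⟩ := ih fs us false true
        simp only [pvStepA, pvStepBwd, pvTagOf_eq, hF, hU]
        simp only [if_true, if_false, Bool.false_eq_true, Option.some.injEq, beq_iff_eq,
          reduceCtorEq, reduceIte, String.reduceEq]
        constructor
        · rw [h1]; cases inF <;> cases inU <;> simp [pvAssign, pvTag]
        · rw [h2]; cases inF <;> cases inU <;> simp [pvAssign, pvTag]
      · by_cases hb : pvIsBullet line
        · simp only [pvStepA, pvStepBwd, pvTagOf_eq, hF, hU, hb]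
          simp only [if_true, if_false, Bool.false_eq_true, Option.some.injEq, beq_iff_eq,
            reduceCtorEq, reduceIte, String.reduceEq]
          cases inF with
          | true =>
            obtain ⟨h1, h2⟩ := ih (fs ++ [pvClean line]) us true inU
            simp only [reduceIte]
            constructor
            · rw [h1]; simp [pvAssign, pvTag]
            · rw [h2]; simp [pvAssign, pvTag]
          | false =>
            cases inU with
            | true =>
              obtain ⟨h1, h2⟩ := ih fs (us ++ [pvClean line]) false true
              simp only [reduceIte, Bool.false_eq_true, if_false]
              constructor
              · rw [h1]; simp [pvAssign, pvTag]
              · rw [h2]; simp [pvAssign, pvTag]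
            | false =>
              obtain ⟨h1, h2⟩ := ih fs us false false
              simp only [reduceIte, Bool.false_eq_true, if_false]
              constructor
              · rw [h1]; simp [pvAssign, pvTag]
              · rw [h2]; simp [pvAssign, pvTag]
        · simp only [pvStepA, pvStepBwd, pvTagOf_eq, hF, hU, hb]
          simp only [if_true, if_false, Bool.false_eq_true, Option.some.injEq, beq_iff_eq,
            reduceCtorEq, reduceIte, String.reduceEq]
          cases inF <;> cases inU <;>
            · obtain ⟨h1, h2⟩ := ih fs us _ _
              try simp only [reduceIte, Bool.false_eq_true, if_false]
              exact ⟨h1, h2⟩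

theorem pvPortA_eq (r : String) :
    extract_features_from_readme_py r =
      (let st := ((PySem.Str.split? r "\n").getD []).foldl pvStepA ([], [], false, false)
       (PySem.Str.join ", " (PySem.List.slice st.1 none (some 5)),
        PySem.Str.join ", " (PySem.List.slice st.2.1 none (some 3)))) := rfl

theorem pvPortB_eq (r : String) :
    extract_features_from_readme_py_alt r =
      (let st := pvR ((PySem.Str.split? r "\n").getD [])
       (PySem.Str.join ", " (PySem.List.slice st.1 none (some 5)),
        PySem.Str.join ", " (PySem.List.slice st.2.1 none (some 3)))) := by
  simp only [extract_features_from_readme_py_alt, pvR, List.foldl_reverse]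

-- ===== VERDICT (by name: the statement is the Claim_ definition above) =====
theorem extract_features_from_readme_py_spec : Claim_equal_extract_features_from_readme_py := by
  intro r _
  show _ = _
  rw [pvPortA_eq, pvPortB_eq]
  obtain ⟨h1, h2⟩ := pvMain ((PySem.Str.split? r "\n").getD []) [] [] false false
  simp only [pvTag, Bool.false_eq_true, if_false] at h1 h2
  simp only [h1, h2, List.nil_append, pvAssign]
  rfl
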